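-- pv_equiv track=rewrite | github.com/Mohamad-Hachem/University | python/generateString.py | parse
-- ===== SOURCE A (Python) =====
-- def parse(listOfNumbers,counter):
--     counterNumbers = len(listOfNumbers)-1
--     while(counter >= 0):
--         nb = counter % 10
--         counter = counter//10
--         listOfNumbers[counterNumbers] = nb
--         counterNumbers -= 1
--         if(counter == 0):
--             break
--     return listOfNumbers
-- ===== SOURCE B (Python) =====
-- def parse(listOfNumbers, counter):
--     if counter < 0:
--         return listOfNumbers
--     for i, ch in enumerate(reversed(str(counter))):
--         listOfNumbers[len(listOfNumbers) - 1 - i] = int(ch)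
--     return listOfNumbers
-- ===== Notes on version B (the rewrite author's own statement) =====
-- stated objective: idiomatic
-- what changed: B replaces A's %10///10 while-loop that peels digits arithmetically by converting the counter with str() and writing enumerate(reversed(str(counter))) digits at positions len-1-i from the end.
import Mathlib
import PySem

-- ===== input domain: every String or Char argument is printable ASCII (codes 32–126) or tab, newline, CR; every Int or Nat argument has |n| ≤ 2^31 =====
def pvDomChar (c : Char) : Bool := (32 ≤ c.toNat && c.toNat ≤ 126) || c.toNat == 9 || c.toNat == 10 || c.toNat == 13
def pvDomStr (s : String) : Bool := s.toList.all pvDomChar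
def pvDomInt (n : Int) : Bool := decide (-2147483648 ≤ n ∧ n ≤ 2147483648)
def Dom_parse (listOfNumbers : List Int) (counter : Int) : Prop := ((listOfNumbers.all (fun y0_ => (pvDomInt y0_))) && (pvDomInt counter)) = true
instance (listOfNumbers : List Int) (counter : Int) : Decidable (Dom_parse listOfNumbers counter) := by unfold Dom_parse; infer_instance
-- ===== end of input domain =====

-- B replaces A's %10 / //10 while-loop by string conversion: enumerate(reversed(str(counter)))
-- writing each digit at listOfNumbers[len-1-i] (idiomatic; same cost). Both A and B mutate the
-- list in place in Python; the equivalence proved here is about the RETURN value.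

-- ===== PORT A =====
-- A's while loop. It only runs when counter >= 0, and counter stays >= 0 inside it, so the loop
-- counter is carried as a Nat: Python's % and // coincide with Nat's % and / on nonnegative
-- operands (PySem.Int.mod_natCast / floordiv_natCast).
def parseLoopA (lst : List Int) (counter : Nat) (idx : Int) : List Int :=
  let nb : Int := ((counter % 10 : Nat) : Int)
  let counter' := counter / 10
  let lst' := PySem.List.pySetD lst idx nb   -- listOfNumbers[counterNumbers] = nb (negative index wraps; Pre_ keeps it in range)
  if counter' = 0 then lst'
  else parseLoopA lst' counter' (idx - 1)
termination_by counter
decreasing_by exact Nat.div_lt_self (by omega) (by omega)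

def parse (listOfNumbers : List Int) (counter : Int) : List Int :=
  if 0 ≤ counter then parseLoopA listOfNumbers counter.toNat (PySem.List.len listOfNumbers - 1)
  else listOfNumbers

-- ===== PORT B =====
def parse_alt (listOfNumbers : List Int) (counter : Int) : List Int :=
  if counter < 0 then listOfNumbers
  else
    (PySem.List.enumerate (PySem.Int.toChars counter).reverse 0).foldl
      (fun acc p =>
        PySem.List.pySetD acc (PySem.List.len acc - 1 - p.1) ((PySem.Int.ofChars? [p.2]).getD 0))
      listOfNumbers

-- ===== PRECONDITION & SPEC =====
-- Pre_ excludes exactly the inputs on which Python A raises IndexError: counter >= 0 with more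
-- decimal digits than twice the list length (the written index falls below -len; in particular
-- any counter >= 0 with an empty list). B raises there too.
def Pre_parse (listOfNumbers : List Int) (counter : Int) : Prop :=
  counter < 0 ∨ (listOfNumbers ≠ [] ∧ counter < 10 ^ (2 * listOfNumbers.length))
instance (listOfNumbers : List Int) (counter : Int) : Decidable (Pre_parse listOfNumbers counter) := by unfold Pre_parse; infer_instance

def pvWitness_parse : List Int × Int := ([3, 1, 4], 42)

def Spec_parse (listOfNumbers : List Int) (counter : Int) (out : List Int) : Prop := out = parse_alt listOfNumbers counter
instance (listOfNumbers : List Int) (counter : Int) (out : List Int) : Decidable (Spec_parse listOfNumbers counter out) := by unfold Spec_parse; infer_instance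

-- ===== CLAIM (what is proved, stated in full; the proofs are below) =====
def Claim_equal_parse : Prop := ∀ (listOfNumbers : List Int) (counter : Int), Dom_parse listOfNumbers counter → Pre_parse listOfNumbers counter → Spec_parse listOfNumbers counter (parse listOfNumbers counter)

-- ===== LEMMAS AND PROOFS =====

-- little-endian decimal digits of n as Ints (mirrors A's loop order)
def dRevI (n : Nat) : List Int :=
  if n / 10 = 0 then [((n % 10 : Nat) : Int)]
  else ((n % 10 : Nat) : Int) :: dRevI (n / 10)
termination_by n
decreasing_by exact Nat.div_lt_self (by omega) (by omega)

-- little-endian decimal digits of n as Chars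
def dRevC (n : Nat) : List Char :=
  if n / 10 = 0 then [Nat.digitChar (n % 10)]
  else Nat.digitChar (n % 10) :: dRevC (n / 10)
termination_by n
decreasing_by exact Nat.div_lt_self (by omega) (by omega)

-- write the digits at idx, idx-1, … (the common shape both ports reduce to)
def writeDesc (lst : List Int) (idx : Int) : List Int → List Int
  | [] => lst
  | d :: ds => writeDesc (PySem.List.pySetD lst idx d) (idx - 1) ds

theorem parseLoopA_eq_writeDesc (n : Nat) : ∀ (lst : List Int) (idx : Int),
    parseLoopA lst n idx = writeDesc lst idx (dRevI n) := by
  induction n using Nat.strong_induction_on with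
  | _ n ih =>
    intro lst idx
    rw [parseLoopA, dRevI]
    by_cases h : n / 10 = 0
    · simp [h, writeDesc]
    · simp only [h, if_false]
      rw [ih (n / 10) (Nat.div_lt_self (by omega) (by omega))]
      simp [writeDesc]

theorem toDigitsCore_eq (f : Nat) : ∀ (n : Nat) (l : List Char), n < f →
    Nat.toDigitsCore 10 f n l = (dRevC n).reverse ++ l := by
  induction f with
  | zero => intro n l h; omega
  | succ f ih =>
    intro n l h
    rw [Nat.toDigitsCore, dRevC]
    by_cases h0 : n / 10 = 0
    · simp [h0]
    · simp only [h0, if_false]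
      rw [ih (n / 10) _ (by omega)]
      simp

theorem conv_digitChar (d : Nat) (hd : d < 10) :
    (PySem.Int.ofChars? [Nat.digitChar d]).getD 0 = (d : Int) := by
  interval_cases d <;> decide

theorem map_conv_dRevC (n : Nat) :
    (dRevC n).map (fun c => (PySem.Int.ofChars? [c]).getD 0) = dRevI n := by
  induction n using Nat.strong_induction_on with
  | _ n ih =>
    rw [dRevC, dRevI]
    by_cases h : n / 10 = 0
    · simp [h, conv_digitChar (n % 10) (Nat.mod_lt _ (by omega))]
    · simp only [h, if_false, List.map_cons]
      rw [ih (n / 10) (Nat.div_lt_self (by omega) (by omega)),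
        conv_digitChar (n % 10) (Nat.mod_lt _ (by omega))]

theorem toChars_reverse_map (n : Nat) :
    ((PySem.Int.toChars (n : Int)).reverse).map (fun c => (PySem.Int.ofChars? [c]).getD 0) = dRevI n := by
  have h1 : PySem.Int.toChars (n : Int) = Nat.toDigits 10 n := by
    simp [PySem.Int.toChars]
  rw [h1, Nat.toDigits, toDigitsCore_eq (n + 1) n [] (by omega)]
  simp [map_conv_dRevC]

theorem foldl_enumerate_writeDesc (conv : Char → Int) (cs : List Char) :
    ∀ (lst : List Int) (k : Int),
    (PySem.List.enumerate cs k).foldl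
      (fun acc p => PySem.List.pySetD acc (PySem.List.len acc - 1 - p.1) (conv p.2)) lst
    = writeDesc lst ((lst.length : Int) - 1 - k) (cs.map conv) := by
  induction cs with
  | nil => intro lst k; simp [PySem.List.enumerate, writeDesc]
  | cons c cs ih =>
    intro lst k
    rw [PySem.List.enumerate, List.map_cons, writeDesc, List.foldl_cons, ih]
    simp only [PySem.List.len_eq, PySem.List.length_pySetD]
    congr 1
    omega

-- ===== VERDICT (by name: the statement is the Claim_ definition above) =====
theorem parse_spec : Claim_equal_parse := by
  intro lst counter _dom _pre
  unfold Spec_parse parse parse_alt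
  by_cases h : 0 ≤ counter
  · obtain ⟨m, rfl⟩ := Int.eq_ofNat_of_zero_le h
    have hneg : ¬ ((m : Int) < 0) := by omega
    simp only [h, if_true, hneg, if_false, Int.toNat_natCast]
    rw [foldl_enumerate_writeDesc (fun c => (PySem.Int.ofChars? [c]).getD 0),
      parseLoopA_eq_writeDesc, toChars_reverse_map]
    simp [PySem.List.len_eq]
  · have hneg : counter < 0 := by omega
    simp [h, hneg]
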